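-- pv_equiv track=rewrite | github.com/ZouRuia/user_portiart | predict_user_attribute/old/gender/data_preprocess.py | save_work_type
-- ===== SOURCE A (Python) =====
-- def save_work_type(data):
--     try:
--         datas = data.split(',')
--     except:
--         datas = ['', ]
--     new_datas = ['未知', ]
--     for the_data in datas:
--         if the_data != '-1' and the_data:
--             new_datas.append(the_data)
--     return new_datas[-1]
-- ===== SOURCE B (Python) =====
-- def save_work_type(data):
--     try:
--         datas = data.split(',')
--     except:
--         datas = ['', ]
--     for t in reversed(datas):
--         if t and t != '-1':
--             return t
--     return '未知'
-- ===== Notes on version B (the rewrite author's own statement) =====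
-- stated objective: simpler
-- what changed: Replaces the forward build-an-accumulator-list-then-index-the-last-element pass by a reversed scan with early return of the first accepted token, maintaining no list at all.
import Mathlib
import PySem

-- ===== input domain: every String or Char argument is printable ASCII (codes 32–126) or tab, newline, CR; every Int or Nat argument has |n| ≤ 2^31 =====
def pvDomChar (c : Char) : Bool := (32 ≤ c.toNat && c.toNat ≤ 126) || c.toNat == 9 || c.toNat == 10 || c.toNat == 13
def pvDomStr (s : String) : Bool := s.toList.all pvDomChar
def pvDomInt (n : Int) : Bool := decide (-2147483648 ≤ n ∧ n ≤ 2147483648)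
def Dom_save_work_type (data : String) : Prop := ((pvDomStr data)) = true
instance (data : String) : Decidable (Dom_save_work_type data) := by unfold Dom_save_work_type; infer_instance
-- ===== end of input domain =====

-- B replaces the forward accumulator-list-then-[-1] pass by a reversed scan with early return (simpler).

-- ===== PORT A =====
-- new_datas[-1] : the list always contains '未知', so the index never raises; .getD "" is unreachable
def save_work_type (data : String) : String :=
  let datas := (PySem.Str.split? data ",").getD [""]
  let new_datas := datas.foldl
    (fun acc the_data => if the_data ≠ "-1" ∧ the_data ≠ "" then acc ++ [the_data] else acc)
    ["未知"]
  (PySem.List.pyGet? new_datas (-1)).getD ""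

-- ===== PORT B =====
def pvRevFind : List String → String
  | [] => "未知"
  | t :: rest => if t ≠ "" ∧ t ≠ "-1" then t else pvRevFind rest

def save_work_type_alt (data : String) : String :=
  pvRevFind ((PySem.Str.split? data ",").getD [""]).reverse

-- ===== PRECONDITION & SPEC =====
def Spec_save_work_type (data : String) (out : String) : Prop := out = save_work_type_alt data
instance (data : String) (out : String) : Decidable (Spec_save_work_type data out) := by unfold Spec_save_work_type; infer_instance

-- ===== CLAIM (what is proved, stated in full; the proofs are below) =====
def Claim_equal_save_work_type : Prop := ∀ (data : String), Dom_save_work_type data → Spec_save_work_type data (save_work_type data)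

-- ===== LEMMAS AND PROOFS =====

-- pvRevFind with a general default, for the loop invariant
def pvRevFindD (d : String) : List String → String
  | [] => d
  | t :: rest => if t ≠ "" ∧ t ≠ "-1" then t else pvRevFindD d rest

theorem pvRevFindD_default : ∀ l, pvRevFindD "未知" l = pvRevFind l := by
  intro l
  induction l with
  | nil => rfl
  | cons t rest ih => simp [pvRevFindD, pvRevFind, ih]

theorem pvRevFindD_append_single (t d : String) :
    ∀ xs, pvRevFindD d (xs ++ [t]) = pvRevFindD (if t ≠ "" ∧ t ≠ "-1" then t else d) xs := by
  intro xs
  induction xs with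
  | nil => by_cases h : t ≠ "" ∧ t ≠ "-1" <;> simp [pvRevFindD, h]
  | cons x rest ih => simp only [List.cons_append, pvRevFindD, ih]

theorem pv_foldl_last (l : List String) : ∀ (acc : List String),
    acc ≠ [] →
    (l.foldl (fun acc the_data =>
        if the_data ≠ "-1" ∧ the_data ≠ "" then acc ++ [the_data] else acc) acc).getLast? =
      some (pvRevFindD (acc.getLastD "") l.reverse) := by
  induction l with
  | nil =>
      intro acc h
      rcases (List.eq_nil_or_concat' acc).resolve_left h with ⟨ys, y, rfl⟩
      simp [pvRevFindD]
  | cons t rest ih =>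
      intro acc h
      simp only [List.foldl_cons, List.reverse_cons, pvRevFindD_append_single]
      by_cases hc : t ≠ "-1" ∧ t ≠ ""
      · rw [if_pos hc, ih (acc ++ [t]) (by simp)]
        have : t ≠ "" ∧ t ≠ "-1" := ⟨hc.2, hc.1⟩
        simp [this]
      · rw [if_neg hc, ih acc h]
        have : ¬ (t ≠ "" ∧ t ≠ "-1") := by tauto
        simp [this]

-- ===== VERDICT (by name: the statement is the Claim_ definition above) =====
theorem save_work_type_spec : Claim_equal_save_work_type := by
  intro data _
  unfold Spec_save_work_type save_work_type save_work_type_alt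
  simp only [PySem.List.pyGet?_neg_one]
  rw [pv_foldl_last _ ["未知"] (by simp)]
  simp [pvRevFindD_default]
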